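-- pv_equiv track=rewrite | github.com/heemin88/algorithm | 프로그래머스/lv2/87390. n＾2 배열 자르기/n＾2 배열 자르기.py | solution
-- ===== SOURCE A (Python) =====
-- def solution(n, left, right):
--     answer = []
--     cnt =0
--
--     for num in range(left,right+1):
--         div = num//n +1
--         mod = num%n
--         if div == mod:
--             answer.append(div+1)
--         elif div < mod:
--             answer.append(mod+1)
--         else:
--             answer.append(div)
--     return answer
-- ===== SOURCE B (Python) =====
-- def solution(n, left, right):
--     # Row-by-row construction: the n*n matrix has value max(r, c) + 1 at row r,
--     # column c, so each row r is a constant run of (r+1)'s followed by the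
--     # ascending run r+2, r+3, ...  Emit, for every row the window [left, right]
--     # touches, its constant segment and its ascending segment directly.
--     if right < left:
--         return []
--     answer = []
--     for r in range(left // n, right // n + 1):
--         lo = max(left - r * n, 0)            # first column of the window in row r
--         hi = min(right - r * n, n - 1)       # last column of the window in row r
--         answer += [r + 1] * (min(hi, r) - lo + 1)        # constant segment
--         answer += range(max(lo, r + 1) + 1, hi + 2)      # ascending segment
--     return answer
-- ===== Notes on version B (the rewrite author's own statement) =====
-- stated objective: alternative
-- what changed: Instead of computing each element of the flat range by per-element floor-division and a three-way branch, B walks the touched matrix rows and emits each row's window as two precomputed segments (a constant run of r+1 then an ascending run), one division pair per row instead of per element; Pre_ covers positive n (the task's natural matrix side) plus all trivially empty slices, excluding nonempty slices with n = 0 (A raises ZeroDivisionError) and with n < 0, where A returns values of a degenerate 'matrix' built from divisor-signed floor division that the row decomposition does not model.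
-- outside the precondition, e.g. on solution(-3, 0, 2): A returns [1, 0, 0], B returns []
import Mathlib
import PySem

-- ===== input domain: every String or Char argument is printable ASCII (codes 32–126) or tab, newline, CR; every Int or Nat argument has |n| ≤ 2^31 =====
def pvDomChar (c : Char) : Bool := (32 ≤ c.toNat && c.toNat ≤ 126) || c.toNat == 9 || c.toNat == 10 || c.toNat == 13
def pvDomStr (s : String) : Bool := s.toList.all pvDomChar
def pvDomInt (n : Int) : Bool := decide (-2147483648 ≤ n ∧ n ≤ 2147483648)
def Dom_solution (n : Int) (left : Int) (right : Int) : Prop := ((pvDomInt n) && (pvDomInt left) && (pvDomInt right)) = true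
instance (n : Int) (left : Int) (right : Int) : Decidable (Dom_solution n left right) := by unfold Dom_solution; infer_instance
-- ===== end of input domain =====

-- B builds the answer row by row as a constant segment plus an ascending segment
-- (one division pair per matrix row) instead of A's per-element divmod with a
-- three-way branch; proved equal on the natural domain n > 0.


-- ===== PORT A =====
-- loop body of 'for num in range(left, right+1)' (the unused 'cnt = 0' is dropped)
def solutionLoop (n : Int) (acc : List Int) (num : Int) : List Int :=
  let div := PySem.Int.floordiv num n + 1
  let mod := PySem.Int.mod num n
  if div = mod then acc ++ [div + 1]
  else if div < mod then acc ++ [mod + 1]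
  else acc ++ [div]

def solution (n : Int) (left : Int) (right : Int) : List Int :=
  (PySem.List.pyRange left (right + 1) 1).foldl (solutionLoop n) []

-- ===== PORT B =====
-- one row's contribution: constant segment '[r+1] * (min(hi,r)-lo+1)' then
-- ascending segment 'range(max(lo,r+1)+1, hi+2)'; lo/hi are the window's first
-- and last columns in row r
def rowSeg (n : Int) (left : Int) (right : Int) (r : Int) : List Int :=
  List.replicate (min (min (right - r * n) (n - 1)) r - max (left - r * n) 0 + 1).toNat (r + 1)
    ++ PySem.List.pyRange (max (max (left - r * n) 0) (r + 1) + 1) (min (right - r * n) (n - 1) + 2) 1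

def solution_alt (n : Int) (left : Int) (right : Int) : List Int :=
  if right < left then []
  else (PySem.List.pyRange (PySem.Int.floordiv left n) (PySem.Int.floordiv right n + 1) 1).foldl
    (fun acc r => acc ++ rowSeg n left right r) []

-- ===== PRECONDITION & SPEC =====
-- Pre_ covers positive n (the task's natural matrix side) plus all trivially empty
-- slices; it excludes the nonempty slices for n = 0 (A raises ZeroDivisionError) and
-- for n < 0, where A returns values of a degenerate 'matrix' (divisor-signed floor
-- division) that the row decomposition does not model.
def Pre_solution (n : Int) (left : Int) (right : Int) : Prop :=
  0 < n ∨ right < left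
instance (n : Int) (left : Int) (right : Int) : Decidable (Pre_solution n left right) := by unfold Pre_solution; infer_instance
def pvWitness_solution : Int × Int × Int := (3, 2, 5)

def Spec_solution (n : Int) (left : Int) (right : Int) (out : List Int) : Prop := out = solution_alt n left right
instance (n : Int) (left : Int) (right : Int) (out : List Int) : Decidable (Spec_solution n left right out) := by unfold Spec_solution; infer_instance

-- ===== CLAIM (what is proved, stated in full; the proofs are below) =====
def Claim_equal_solution : Prop := ∀ (n : Int) (left : Int) (right : Int), Dom_solution n left right → Pre_solution n left right → Spec_solution n left right (solution n left right)

-- ===== LEMMAS AND PROOFS =====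

-- the value A appends for flat index num is max(num//n, num%n) + 1
def aVal (n : Int) (num : Int) : Int :=
  max (PySem.Int.floordiv num n) (PySem.Int.mod num n) + 1

theorem solutionLoop_eq_append (n : Int) (acc : List Int) (num : Int) :
    solutionLoop n acc num = acc ++ [aVal n num] := by
  unfold solutionLoop aVal
  dsimp only
  generalize PySem.Int.floordiv num n = q
  generalize PySem.Int.mod num n = m
  split_ifs <;> simp <;> omega

theorem aVal_at (n r c : Int) (hn : 0 < n) (hc0 : 0 ≤ c) (hcn : c < n) :
    aVal n (r * n + c) = max r c + 1 := by
  have hq : PySem.Int.floordiv (r * n + c) n = r := by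
    rw [PySem.Int.floordiv_eq_iff_of_pos hn]
    constructor <;> nlinarith
  have hm : PySem.Int.mod (r * n + c) n = c := by
    have := PySem.Int.floordiv_mul_add_mod (r * n + c) n
    rw [hq] at this; omega
  rw [aVal, hq, hm]

-- one row's contribution is the per-element values over its flat-index window
theorem rowSeg_eq_map (n left right r : Int) (hn : 0 < n) :
    rowSeg n left right r
      = (PySem.List.pyRange (r * n + max (left - r * n) 0)
          (r * n + min (right - r * n) (n - 1) + 1) 1).map (aVal n) := by
  unfold rowSeg
  set lo := max (left - r * n) 0 with hlo
  set hi := min (right - r * n) (n - 1) with hhi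
  have hlo0 : 0 ≤ lo := le_max_right _ _
  have hhin : hi ≤ n - 1 := min_le_right _ _
  by_cases hle : lo ≤ hi
  · -- split the flat window at s = min (max lo (r+1)) (hi+1)
    set s := min (max lo (r + 1)) (hi + 1) with hs
    have h1 : lo ≤ s := by omega
    have h2 : s ≤ hi + 1 := by omega
    rw [PySem.List.pyRange_one_append (r * n + lo) (r * n + s) (r * n + hi + 1)
        (by omega) (by omega), List.map_append]
    congr 1
    · -- constant segment: all flat indices below s have column ≤ r
      rw [PySem.List.pyRange_one, List.map_map]
      have hcount : (min hi r - lo + 1).toNat = (r * n + s - (r * n + lo)).toNat := by omega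
      rw [hcount]
      symm
      rw [List.eq_replicate_iff]
      refine ⟨by simp, ?_⟩
      intro x hx
      rw [List.mem_map] at hx
      obtain ⟨k, hk, rfl⟩ := hx
      rw [List.mem_range] at hk
      have hk' : (k : Int) < r * n + s - (r * n + lo) := by omega
      simp only [Function.comp_apply]
      have he : r * n + lo + (k : Int) = r * n + (lo + k) := by ring
      rw [he, aVal_at n r (lo + k) hn (by omega) (by omega)]
      have : lo + (k : Int) ≤ r := by omega
      omega
    · -- ascending segment: columns above r carry their own value c+1
      rw [PySem.List.pyRange_one, PySem.List.pyRange_one, List.map_map]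
      have hlen : (hi + 2 - (max lo (r + 1) + 1)).toNat
          = (r * n + hi + 1 - (r * n + s)).toNat := by omega
      rw [hlen]
      apply List.map_congr_left
      intro k hk
      rw [List.mem_range] at hk
      have hk' : (k : Int) < r * n + hi + 1 - (r * n + s) := by omega
      have hsge : r + 1 ≤ s := by omega
      simp only [Function.comp_apply]
      have he : r * n + s + (k : Int) = r * n + (s + k) := by ring
      rw [he, aVal_at n r (s + k) hn (by omega) (by omega)]
      omega
  · -- empty window: every piece is nil
    have e1 : (min hi r - lo + 1).toNat = 0 := by omega
    rw [e1, List.replicate_zero, List.nil_append,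
        PySem.List.pyRange_one_eq_nil (by omega),
        PySem.List.pyRange_one_eq_nil (by omega)]
    simp

-- floor division by a positive n is monotone
theorem floordiv_mono (n a b : Int) (hn : 0 < n) (h : a ≤ b) :
    PySem.Int.floordiv a n ≤ PySem.Int.floordiv b n := by
  rw [PySem.Int.floordiv_eq_ediv_of_pos hn, PySem.Int.floordiv_eq_ediv_of_pos hn]
  exact Int.ediv_le_ediv hn h

theorem floordiv_bounds (n a : Int) (hn : 0 < n) :
    PySem.Int.floordiv a n * n ≤ a ∧ a < (PySem.Int.floordiv a n + 1) * n :=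
  (PySem.Int.floordiv_eq_iff_of_pos hn).mp rfl

-- B's row loop flattens to the per-element values over the whole flat range
theorem rows_eq_map (n : Int) (hn : 0 < n) (right : Int) : ∀ (left : Int),
    (PySem.List.pyRange (PySem.Int.floordiv left n) (PySem.Int.floordiv right n + 1) 1).flatMap
        (rowSeg n left right)
      = (PySem.List.pyRange left (right + 1) 1).map (aVal n) := by
  intro left
  induction hg : (PySem.Int.floordiv right n + 1 - PySem.Int.floordiv left n).toNat
      using Nat.strong_induction_on generalizing left with
  | _ g ih =>
  have hLb := floordiv_bounds n left hn
  have hRb := floordiv_bounds n right hn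
  rcases lt_trichotomy (PySem.Int.floordiv left n) (PySem.Int.floordiv right n)
    with hlt | heq | hgt
  · -- more than one row: peel row L = left//n, recurse from the next row boundary
    have hnext : PySem.Int.floordiv ((PySem.Int.floordiv left n + 1) * n) n
        = PySem.Int.floordiv left n + 1 := by
      rw [PySem.Int.floordiv_eq_iff_of_pos hn]
      constructor
      · exact le_refl _
      · nlinarith
    rw [PySem.List.pyRange_one_cons (by omega), List.flatMap_cons]
    have hcong : (PySem.List.pyRange (PySem.Int.floordiv left n + 1)
            (PySem.Int.floordiv right n + 1) 1).flatMap (rowSeg n left right)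
        = (PySem.List.pyRange (PySem.Int.floordiv left n + 1)
            (PySem.Int.floordiv right n + 1) 1).flatMap
            (rowSeg n ((PySem.Int.floordiv left n + 1) * n) right) := by
      rw [List.flatMap_def, List.flatMap_def]
      congr 1
      apply List.map_congr_left
      intro r hr
      rw [PySem.List.mem_pyRange_one] at hr
      have hrn : (PySem.Int.floordiv left n + 1) * n ≤ r * n :=
        mul_le_mul_of_nonneg_right hr.1 hn.le
      unfold rowSeg
      have e1 : max (left - r * n) 0 = 0 := by omega
      have e2 : max ((PySem.Int.floordiv left n + 1) * n - r * n) 0 = 0 := by omega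
      rw [e1, e2]
    have hrec := ih (PySem.Int.floordiv right n + 1 - (PySem.Int.floordiv left n + 1)).toNat
      (by omega) ((PySem.Int.floordiv left n + 1) * n) (by rw [hnext])
    rw [hnext] at hrec
    rw [hcong, hrec]
    have hL1r : (PySem.Int.floordiv left n + 1) * n ≤ right :=
      le_trans (mul_le_mul_of_nonneg_right (by omega) hn.le) hRb.1
    rw [PySem.List.pyRange_one_append left ((PySem.Int.floordiv left n + 1) * n) (right + 1)
        (by omega) (by omega), List.map_append]
    congr 1
    rw [rowSeg_eq_map n left right (PySem.Int.floordiv left n) hn]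
    have hexp : (PySem.Int.floordiv left n + 1) * n = PySem.Int.floordiv left n * n + n := by
      ring
    have e1 : PySem.Int.floordiv left n * n + max (left - PySem.Int.floordiv left n * n) 0
        = left := by omega
    have e2 : min (right - PySem.Int.floordiv left n * n) (n - 1) = n - 1 := by omega
    have e3 : PySem.Int.floordiv left n * n + (n - 1) + 1
        = (PySem.Int.floordiv left n + 1) * n := by omega
    rw [e1, e2, e3]
  · -- exactly one row
    rw [heq] at hLb ⊢
    rw [PySem.List.pyRange_one_singleton, List.flatMap_cons, List.flatMap_nil,
        List.append_nil, rowSeg_eq_map n left right (PySem.Int.floordiv right n) hn]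
    have hexp : (PySem.Int.floordiv right n + 1) * n
        = PySem.Int.floordiv right n * n + n := by ring
    have e1 : PySem.Int.floordiv right n * n + max (left - PySem.Int.floordiv right n * n) 0
        = left := by omega
    have e2 : min (right - PySem.Int.floordiv right n * n) (n - 1)
        = right - PySem.Int.floordiv right n * n := by omega
    have e3 : PySem.Int.floordiv right n * n + (right - PySem.Int.floordiv right n * n) + 1
        = right + 1 := by omega
    rw [e1, e2, e3]
  · -- no rows at all: then right < left and both sides are nil
    have : right < left := by
      by_contra h
      exact absurd (floordiv_mono n left right hn (by omega)) (by omega)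
    rw [PySem.List.pyRange_one_eq_nil (by omega), PySem.List.pyRange_one_eq_nil (by omega)]
    simp

-- ===== VERDICT (by name: the statement is the Claim_ definition above) =====
-- ===== VERDICT (by name: the statement is the Claim_ definition above) =====
theorem solution_spec : Claim_equal_solution := by
  intro n left right _ hpre
  unfold Spec_solution solution solution_alt
  by_cases hrl : right < left
  · -- empty slice: A's flat range is empty, B returns [] up front
    rw [if_pos hrl, PySem.List.pyRange_one_eq_nil (by omega), List.foldl_nil]
  · have hn : 0 < n := by rcases hpre with h | h <;> omega
    rw [if_neg hrl, PySem.List.foldl_append_eq_flatMap, List.nil_append, rows_eq_map n hn]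
    have hfun : solutionLoop n = fun acc num => acc ++ [aVal n num] :=
      funext fun a => funext fun x => solutionLoop_eq_append n a x
    rw [hfun, PySem.List.foldl_append_singleton_eq_map, List.nil_append]
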